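-- pv_equiv track=rewrite | github.com/Laboratoire-de-Chemoinformatique/SynPlanner | synplan/utils/visualisation.py | _mirror_route_layout
-- ===== SOURCE A (Python) =====
-- def _mirror_route_layout(columns, pred):
--     """Mirror root-to-leaf route columns so the target stays on the right."""
--     if len(columns) <= 1:
--         return columns, tuple(pred)
--
--     old_to_new = {}
--     new_col_starts = []
--     acc = 0
--     for column in reversed(columns):
--         new_col_starts.append(acc)
--         acc += len(column)
--
--     old_idx = 0
--     for col_idx, column in enumerate(columns):
--         new_start = new_col_starts[len(columns) - 1 - col_idx]
--         for pos_in_col in range(len(column)):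
--             old_to_new[old_idx] = new_start + pos_in_col
--             old_idx += 1
--
--     mirrored_columns = list(reversed(columns))
--     mirrored_pred = tuple(
--         (old_to_new[parent_idx], old_to_new[child_idx])
--         for parent_idx, child_idx in pred
--     )
--     return mirrored_columns, mirrored_pred
-- ===== SOURCE B (Python) =====
-- def _mirror_route_layout(columns, pred):
--     """Mirror root-to-leaf route columns so the target stays on the right."""
--     if len(columns) <= 1:
--         return columns, tuple(pred)
--
--     total = sum(len(column) for column in columns)
--
--     def new_index(i):
--         # Locate the column holding flat index i, compute its mirrored position.
--         acc = 0
--         for column in columns: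
--             if i < acc + len(column):
--                 return total - (acc + len(column)) + (i - acc)
--             acc += len(column)
--
--     mirrored_pred = tuple(
--         (new_index(parent_idx), new_index(child_idx)) for parent_idx, child_idx in pred
--     )
--     return list(reversed(columns)), mirrored_pred
-- ===== Notes on version B (the rewrite author's own statement) =====
-- stated objective: alternative
-- what changed: A precomputes an old-to-new index dictionary by enumerating every flat position; B builds no mapping at all and instead translates each pred index on demand by scanning columns to locate its column and computing the mirrored position arithmetically.
import Mathlib
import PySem

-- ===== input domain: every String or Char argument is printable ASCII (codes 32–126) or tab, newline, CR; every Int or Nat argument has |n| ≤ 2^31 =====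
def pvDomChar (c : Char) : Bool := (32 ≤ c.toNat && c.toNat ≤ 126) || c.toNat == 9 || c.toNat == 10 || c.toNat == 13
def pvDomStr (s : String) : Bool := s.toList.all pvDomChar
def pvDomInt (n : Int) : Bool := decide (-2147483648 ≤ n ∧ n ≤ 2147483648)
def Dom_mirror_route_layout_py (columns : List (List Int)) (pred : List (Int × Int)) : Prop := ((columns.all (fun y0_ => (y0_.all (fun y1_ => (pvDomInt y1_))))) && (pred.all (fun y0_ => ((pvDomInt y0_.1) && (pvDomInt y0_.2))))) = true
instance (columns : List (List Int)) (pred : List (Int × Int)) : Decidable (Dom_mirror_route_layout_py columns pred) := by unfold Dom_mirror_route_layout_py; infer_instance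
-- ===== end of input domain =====

-- B builds no old-to-new index mapping at all: each pred index is translated on demand by
-- scanning columns for the one containing it and computing its mirrored position arithmetically
-- (alternative decomposition; return-value equivalence on Pre_).

-- ===== PORT A =====
def mirror_route_layout_py (columns : List (List Int)) (pred : List (Int × Int)) :
    List (List Int) × (List (Int × Int)) :=
  if columns.length ≤ 1 then (columns, pred)
  else
    -- new_col_starts: acc over reversed(columns)
    let starts := (columns.reverse.foldl
      (fun (st : List Int × Int) column => (st.1 ++ [st.2], st.2 + column.length)) ([], 0)).1
    -- for col_idx, column in enumerate(columns): inner loop over range(len(column)), state (old_to_new, old_idx)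
    let loop := (PySem.List.enumerate columns 0).foldl
      (fun (st : PySem.Dict Int Int × Int) ci =>
        let new_start := PySem.List.pyGetD starts ((columns.length : Int) - 1 - ci.1) 0
        (PySem.List.pyRange 0 (ci.2.length : Int) 1).foldl
          (fun (st2 : PySem.Dict Int Int × Int) pos =>
            (st2.1.insert st2.2 (new_start + pos), st2.2 + 1)) st)
      (PySem.Dict.empty, 0)
    -- old_to_new[idx] lookups: KeyError (= none) excluded by Pre_
    (columns.reverse,
      pred.map (fun pc => ((loop.1.get? pc.1).getD 0, (loop.1.get? pc.2).getD 0)))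

-- ===== PORT B =====
-- new_index(i): scan columns with a running offset acc; the first column with i < acc + len(column)
-- yields total - (acc + len(column)) + (i - acc); falling off the end is None (excluded by Pre_).
def pvNewIdx (total i : Int) : List (List Int) → Int → Option Int
  | [], _ => none
  | c :: cs, acc =>
      if i < acc + (c.length : Int) then
        some (total - (acc + (c.length : Int)) + (i - acc))
      else pvNewIdx total i cs (acc + (c.length : Int))

def mirror_route_layout_py_alt (columns : List (List Int)) (pred : List (Int × Int)) :
    List (List Int) × (List (Int × Int)) :=
  if columns.length ≤ 1 then (columns, pred)
  else
    let total : Int := (columns.map (fun c => (c.length : Int))).sum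
    (columns.reverse,
      pred.map (fun pc => ((pvNewIdx total pc.1 columns 0).getD 0,
                           (pvNewIdx total pc.2 columns 0).getD 0)))

-- ===== PRECONDITION & SPEC =====
-- Pre_ excludes exactly the inputs where A raises KeyError: with ≥ 2 columns, a pred entry
-- whose index is not a valid flat position (negative or ≥ the total number of nodes).
def Pre_mirror_route_layout_py (columns : List (List Int)) (pred : List (Int × Int)) : Prop :=
  columns.length ≤ 1 ∨
    ∀ pc ∈ pred, 0 ≤ pc.1 ∧ pc.1 < ((columns.map (fun c => (c.length : Int))).sum) ∧
                 0 ≤ pc.2 ∧ pc.2 < ((columns.map (fun c => (c.length : Int))).sum)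
instance (columns : List (List Int)) (pred : List (Int × Int)) : Decidable (Pre_mirror_route_layout_py columns pred) := by unfold Pre_mirror_route_layout_py; infer_instance

def pvWitness_mirror_route_layout_py : List (List Int) × (List (Int × Int)) :=
  ([[10], [20, 30]], [(0, 1), (0, 2)])

def Spec_mirror_route_layout_py (columns : List (List Int)) (pred : List (Int × Int)) (out : List (List Int) × (List (Int × Int))) : Prop := out = mirror_route_layout_py_alt columns pred
instance (columns : List (List Int)) (pred : List (Int × Int)) (out : List (List Int) × (List (Int × Int))) : Decidable (Spec_mirror_route_layout_py columns pred out) := by unfold Spec_mirror_route_layout_py; infer_instance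

-- ===== CLAIM (what is proved, stated in full; the proofs are below) =====
def Claim_equal_mirror_route_layout_py : Prop := ∀ (columns : List (List Int)) (pred : List (Int × Int)), Dom_mirror_route_layout_py columns pred → Pre_mirror_route_layout_py columns pred → Spec_mirror_route_layout_py columns pred (mirror_route_layout_py columns pred)

-- ===== LEMMAS AND PROOFS =====

def sumLens (cols : List (List Int)) : Int := (cols.map (fun c => (c.length : Int))).sum

def prefixStarts : List (List Int) → Int → List Int
  | [], _ => []
  | c :: cs, s => s :: prefixStarts cs (s + c.length)

def flatTail (total : Int) : List (List Int) → Int → List Int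
  | [], _ => []
  | c :: cs, e =>
      PySem.List.pyRange (total - (e + c.length)) (total - (e + c.length) + c.length) 1 ++
        flatTail total cs (e + c.length)

theorem foldl_starts (cols : List (List Int)) : ∀ (acc : List Int) (s : Int),
    cols.foldl (fun (st : List Int × Int) column => (st.1 ++ [st.2], st.2 + column.length)) (acc, s)
      = (acc ++ prefixStarts cols s, s + sumLens cols) := by
  induction cols with
  | nil => intro acc s; simp [prefixStarts, sumLens]
  | cons c cs ih =>
      intro acc s
      simp only [List.foldl_cons, ih, prefixStarts, sumLens, List.map_cons, List.sum_cons,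
        Prod.mk.injEq]
      exact ⟨by simp, by ring⟩

theorem getD_prefixStarts (cols : List (List Int)) : ∀ (s : Int) (k : Nat), k < cols.length →
    (prefixStarts cols s).getD k 0 = s + sumLens (cols.take k) := by
  induction cols with
  | nil => intro s k hk; simp at hk
  | cons c cs ih =>
      intro s k hk
      cases k with
      | zero => simp [prefixStarts, sumLens]
      | succ k =>
          simp only [prefixStarts, List.getD_cons_succ, List.take_succ_cons, sumLens,
            List.map_cons, List.sum_cons]
          rw [ih (s + c.length) k (by simpa using hk)]
          simp [sumLens]; ring

-- dict built as {0: tb[0], 1: tb[1], …} looked up at a nonnegative key is list indexing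
theorem get?_mk_enumerate (tb : List Int) : ∀ (s p : Int), s ≤ p →
    (PySem.Dict.mk (PySem.List.enumerate tb s)).get? p = tb[(p - s).toNat]? := by
  induction tb with
  | nil => intro s p _; simp [PySem.List.enumerate_nil, PySem.Dict.get?]
  | cons a tb ih =>
      intro s p hsp
      rw [PySem.List.enumerate_cons, PySem.Dict.get?_mk_cons]
      by_cases h : s = p
      · simp [h]
      · rw [if_neg (by simpa using h)]
        rw [ih (s + 1) p (by omega)]
        have h1 : (p - s).toNat = (p - (s + 1)).toNat + 1 := by omega
        rw [h1, List.getElem?_cons_succ]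

theorem innerA (v : Int) : ∀ (m : Nat) (acc : List Int),
    (PySem.List.pyRange 0 (m : Int) 1).foldl
      (fun (st2 : PySem.Dict Int Int × Int) pos =>
        (st2.1.insert st2.2 (v + pos), st2.2 + 1))
      (PySem.Dict.mk (PySem.List.enumerate acc 0), (acc.length : Int))
    = (PySem.Dict.mk (PySem.List.enumerate (acc ++ PySem.List.pyRange v (v + m) 1) 0),
       ((acc.length : Int) + m)) := by
  intro m
  induction m with
  | zero =>
      intro acc
      simp [PySem.List.pyRange_one_eq_nil]
  | succ m ih =>
      intro acc
      have hcast : ((m + 1 : Nat) : Int) = (m : Int) + 1 := by push_cast; ring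
      rw [hcast, PySem.List.pyRange_one_succ_right (by positivity), List.foldl_append, ih acc]
      simp only [List.foldl_cons, List.foldl_nil]
      have hL : ((acc ++ PySem.List.pyRange v (v + m) 1).length : Int) = (acc.length : Int) + m := by
        simp [PySem.List.length_pyRange_one]
      have hfresh : (PySem.Dict.mk (PySem.List.enumerate (acc ++ PySem.List.pyRange v (v + m) 1) 0)).contains ((acc.length : Int) + m) = false := by
        rw [PySem.Dict.contains_eq_decide_mem_keys]
        simp only [PySem.Dict.keys_mk, PySem.List.map_fst_enumerate]
        rw [decide_eq_false_iff_not]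
        intro hmem
        rw [PySem.List.mem_pyRange_one] at hmem
        simp only [zero_add] at hmem
        omega
      have hsplit : PySem.List.pyRange v (v + ((m : Int) + 1)) 1
          = PySem.List.pyRange v (v + m) 1 ++ [v + m] := by
        have := PySem.List.pyRange_one_succ_right (a := v) (b := v + m) (by omega)
        rw [← this]; ring_nf
      apply Prod.ext
      · apply PySem.Dict.ext
        rw [PySem.Dict.items_insert_of_not_contains _ _ hfresh]
        rw [hsplit, ← List.append_assoc]
        simp [PySem.List.enumerate_append, PySem.List.enumerate_cons, PySem.List.enumerate_nil,
          PySem.List.length_pyRange_one]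
      · simp; ring

theorem outerA (starts : List Int) (n : Nat) (total : Int) :
    ∀ (cols : List (List Int)) (j : Int) (acc : List Int),
    (∀ k : Nat, k < cols.length →
        PySem.List.pyGetD starts ((n : Int) - 1 - (j + k)) 0
          = total - ((acc.length : Int) + sumLens (cols.take (k + 1)))) →
    (PySem.List.enumerate cols j).foldl
      (fun (st : PySem.Dict Int Int × Int) ci =>
        let new_start := PySem.List.pyGetD starts ((n : Int) - 1 - ci.1) 0
        (PySem.List.pyRange 0 (ci.2.length : Int) 1).foldl
          (fun (st2 : PySem.Dict Int Int × Int) pos =>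
            (st2.1.insert st2.2 (new_start + pos), st2.2 + 1)) st)
      (PySem.Dict.mk (PySem.List.enumerate acc 0), (acc.length : Int))
    = (PySem.Dict.mk (PySem.List.enumerate (acc ++ flatTail total cols (acc.length : Int)) 0),
       ((acc.length : Int) + sumLens cols)) := by
  intro cols
  induction cols with
  | nil => intro j acc _; simp [flatTail, sumLens]
  | cons c cs ih =>
      intro j acc hyp
      rw [PySem.List.enumerate_cons, List.foldl_cons]
      have h0 := hyp 0 (by simp)
      simp only [List.take_succ_cons, List.take_zero, sumLens, List.map_cons, List.map_nil,
        List.sum_cons, List.sum_nil, Nat.cast_zero, add_zero] at h0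
      set v : Int := total - ((acc.length : Int) + (c.length : Int)) with hv
      dsimp only
      rw [h0, innerA v c.length acc]
      set acc' := acc ++ PySem.List.pyRange v (v + c.length) 1 with hacc'
      have hlen' : (acc'.length : Int) = (acc.length : Int) + c.length := by
        simp [hacc', PySem.List.length_pyRange_one]
      have hyp' : ∀ k : Nat, k < cs.length →
          PySem.List.pyGetD starts ((n : Int) - 1 - ((j + 1) + k)) 0
            = total - ((acc'.length : Int) + sumLens (cs.take (k + 1))) := by
        intro k hk
        have := hyp (k + 1) (by simp only [List.length_cons]; omega)
        have hc : (j + ((k + 1 : Nat) : Int)) = (j + 1) + k := by push_cast; ring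
        rw [hc] at this
        rw [this, hlen']
        simp only [List.take_succ_cons, sumLens, List.map_cons, List.sum_cons]
        ring
      have := ih (j + 1) acc' hyp'
      rw [hlen'] at this
      rw [this]
      apply Prod.ext
      · apply PySem.Dict.ext
        congr 1
        rw [hacc', List.append_assoc, flatTail, hv]
      · simp only [sumLens, List.map_cons, List.sum_cons]
        ring

theorem sumLens_reverse_take (cols : List (List Int)) (m : Nat) :
    sumLens (cols.reverse.take m) = sumLens cols - sumLens (cols.take (cols.length - m)) := by
  have hdt : cols.reverse.take m = (cols.drop (cols.length - m)).reverse := by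
    exact List.take_reverse
  rw [hdt]
  have h2 : sumLens ((cols.drop (cols.length - m)).reverse) = sumLens (cols.drop (cols.length - m)) := by
    simp [sumLens]
  rw [h2]
  have h3 : sumLens (cols.take (cols.length - m)) + sumLens (cols.drop (cols.length - m)) = sumLens cols := by
    simp only [sumLens]
    rw [← List.sum_append, ← List.map_append, List.take_append_drop]
  omega

theorem outerA0 (starts : List Int) (n : Nat) (total : Int) (cols : List (List Int))
    (hyp : ∀ k : Nat, k < cols.length →
        PySem.List.pyGetD starts ((n : Int) - 1 - ((0 : Int) + k)) 0
          = total - sumLens (cols.take (k + 1))) :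
    (PySem.List.enumerate cols 0).foldl
      (fun (st : PySem.Dict Int Int × Int) ci =>
        let new_start := PySem.List.pyGetD starts ((n : Int) - 1 - ci.1) 0
        (PySem.List.pyRange 0 (ci.2.length : Int) 1).foldl
          (fun (st2 : PySem.Dict Int Int × Int) pos =>
            (st2.1.insert st2.2 (new_start + pos), st2.2 + 1)) st)
      (PySem.Dict.empty, 0)
    = (PySem.Dict.mk (PySem.List.enumerate (flatTail total cols 0) 0), sumLens cols) := by
  have := outerA starts n total cols 0 [] (by simpa using hyp)
  simpa using this

-- the flat mirrored-position table, read at index i, is exactly B's on-demand column scan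
theorem flatTail_get (total : Int) : ∀ (cols : List (List Int)) (e i : Int), e ≤ i →
    (flatTail total cols e)[(i - e).toNat]? = pvNewIdx total i cols e := by
  intro cols
  induction cols with
  | nil => intro e i _; simp [flatTail, pvNewIdx]
  | cons c cs ih =>
      intro e i hei
      rw [flatTail, pvNewIdx]
      by_cases h : i < e + (c.length : Int)
      · rw [if_pos h]
        have hlt : (i - e).toNat < (PySem.List.pyRange (total - (e + c.length)) (total - (e + c.length) + c.length) 1).length := by
          rw [PySem.List.length_pyRange_one]; omega
        rw [List.getElem?_append_left hlt, List.getElem?_eq_getElem hlt,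
          PySem.List.getElem_pyRange_one]
        congr 1
        have : (((i - e).toNat : Int)) = i - e := by omega
        rw [this]
      · rw [if_neg h]
        have hlen : (PySem.List.pyRange (total - (e + c.length)) (total - (e + c.length) + c.length) 1).length = c.length := by
          rw [PySem.List.length_pyRange_one]; omega
        have hge : (PySem.List.pyRange (total - (e + c.length)) (total - (e + c.length) + c.length) 1).length ≤ (i - e).toNat := by
          rw [hlen]; omega
        rw [List.getElem?_append_right hge, hlen]
        have hidx : (i - e).toNat - c.length = (i - (e + (c.length : Int))).toNat := by omega
        rw [hidx]
        exact ih (e + c.length) i (by omega)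

-- ===== VERDICT (by name: the statement is the Claim_ definition above) =====
theorem mirror_route_layout_py_spec : Claim_equal_mirror_route_layout_py := by
  intro columns pred _hdom hpre
  unfold Spec_mirror_route_layout_py mirror_route_layout_py mirror_route_layout_py_alt
  by_cases h : columns.length ≤ 1
  · simp [h]
  · rw [if_neg h, if_neg h]
    rcases hpre with hpre | hpre
    · exact absurd hpre h
    dsimp only
    have hstarts : (columns.reverse.foldl
        (fun (st : List Int × Int) column => (st.1 ++ [st.2], st.2 + column.length)) ([], 0)).1
        = prefixStarts columns.reverse 0 := by
      rw [foldl_starts columns.reverse [] 0]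
      simp
    rw [hstarts]
    set n := columns.length with hn
    set total : Int := (columns.map (fun c => (c.length : Int))).sum with htotal
    have hyp : ∀ k : Nat, k < columns.length →
        PySem.List.pyGetD (prefixStarts columns.reverse 0) ((n : Int) - 1 - ((0 : Int) + k)) 0
          = total - sumLens (columns.take (k + 1)) := by
      intro k hk
      have hcast : ((n : Int) - 1 - ((0 : Int) + k)) = ((n - 1 - k : Nat) : Int) := by
        rw [hn]; omega
      rw [hcast, PySem.List.pyGetD_natCast,
        getD_prefixStarts columns.reverse 0 (n - 1 - k) (by simp [hn]; omega),
        sumLens_reverse_take columns (n - 1 - k)]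
      have hnk : n - (n - 1 - k) = k + 1 := by omega
      rw [hn] at hnk ⊢
      rw [hnk]
      simp only [sumLens, zero_add, htotal]
    rw [outerA0 (prefixStarts columns.reverse 0) n total columns hyp]
    apply Prod.ext
    · rfl
    · apply List.map_congr_left
      intro pc hmem
      obtain ⟨h1, _h2, h3, _h4⟩ := hpre pc hmem
      dsimp only
      rw [get?_mk_enumerate (flatTail total columns 0) 0 pc.1 h1,
        get?_mk_enumerate (flatTail total columns 0) 0 pc.2 h3]
      rw [flatTail_get total columns 0 pc.1 h1, flatTail_get total columns 0 pc.2 h3]
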